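-- pv_equiv track=rewrite | github.com/htoyll8/D-Caps | main2.py | createSketchWithFilledHole
-- ===== SOURCE A (Python) =====
-- def createSketchWithFilledHole(host, version, hole_num, sketch_id, sketch, option_idx, option):
--     hole_counter = 0
--     updated_sketch = ""
--     # Store the indices of the holes in the sketch.
--     for ch in sketch:
--         if(ch == '?'):
--             if hole_counter == hole_num:
--                 updated_sketch += f'{option}'
--                 # Add space after the hole option to align all of the sketches.
--             else:
--                 updated_sketch += ch
--             hole_counter += 1
--         else:
--             updated_sketch += ch
--     return updated_sketch
-- ===== SOURCE B (Python) =====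
-- def createSketchWithFilledHole(host, version, hole_num, sketch_id, sketch, option_idx, option):
--     segs = sketch.split('?')
--     if 0 <= hole_num < len(segs) - 1:
--         return '?'.join(segs[:hole_num + 1]) + f'{option}' + '?'.join(segs[hole_num + 1:])
--     return sketch
-- ===== Notes on version B (the rewrite author's own statement) =====
-- stated objective: faster
-- what changed: Instead of scanning the sketch character by character with a running hole counter and quadratic string concatenation, B splits the sketch once on '?', substitutes the chosen segment boundary with the option, and rejoins the two halves with str.join; out-of-range hole numbers fall through to returning the sketch unchanged.
import Mathlib
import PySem

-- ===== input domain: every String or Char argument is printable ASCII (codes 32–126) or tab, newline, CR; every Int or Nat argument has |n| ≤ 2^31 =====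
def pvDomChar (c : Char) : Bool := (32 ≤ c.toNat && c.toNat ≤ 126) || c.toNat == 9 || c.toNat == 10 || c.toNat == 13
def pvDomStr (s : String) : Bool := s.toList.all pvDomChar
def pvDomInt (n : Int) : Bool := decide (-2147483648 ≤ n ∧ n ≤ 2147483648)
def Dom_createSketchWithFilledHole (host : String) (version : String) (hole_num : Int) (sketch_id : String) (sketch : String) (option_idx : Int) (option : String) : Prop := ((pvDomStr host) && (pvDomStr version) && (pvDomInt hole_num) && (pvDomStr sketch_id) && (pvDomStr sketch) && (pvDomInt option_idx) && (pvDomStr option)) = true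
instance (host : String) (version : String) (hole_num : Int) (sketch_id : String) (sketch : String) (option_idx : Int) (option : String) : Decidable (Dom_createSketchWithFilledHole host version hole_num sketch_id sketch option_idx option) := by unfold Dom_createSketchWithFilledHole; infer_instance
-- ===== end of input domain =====

-- B replaces A's character-by-character scan (hole counter + string concatenation) by
-- splitting the sketch on '?' and rejoining the segments around the chosen hole: simpler.

-- ===== PORT A =====
-- The for-loop of A: state = (running hole counter, accumulated output string).
def cswfhLoop (hole_num : Int) (opt : List Char) : List Char → Int → List Char → List Char
  | [], _, acc => acc
  | c :: cs, counter, acc =>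
    if c = '?' then
      if counter = hole_num then cswfhLoop hole_num opt cs (counter + 1) (acc ++ opt)
      else cswfhLoop hole_num opt cs (counter + 1) (acc ++ [c])
    else cswfhLoop hole_num opt cs counter (acc ++ [c])

def createSketchWithFilledHole (host : String) (version : String) (hole_num : Int) (sketch_id : String) (sketch : String) (option_idx : Int) (option : String) : String :=
  String.ofList (cswfhLoop hole_num option.toList sketch.toList 0 [])

-- ===== PORT B =====
def createSketchWithFilledHole_alt (host : String) (version : String) (hole_num : Int) (sketch_id : String) (sketch : String) (option_idx : Int) (option : String) : String :=
  let segs := List.splitOn '?' sketch.toList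
  if 0 ≤ hole_num ∧ hole_num < (segs.length : Int) - 1 then
    String.ofList (['?'].intercalate (segs.take (hole_num.toNat + 1)) ++ option.toList ++ ['?'].intercalate (segs.drop (hole_num.toNat + 1)))
  else sketch

-- ===== PRECONDITION & SPEC =====
def Spec_createSketchWithFilledHole (host : String) (version : String) (hole_num : Int) (sketch_id : String) (sketch : String) (option_idx : Int) (option : String) (out : String) : Prop := out = createSketchWithFilledHole_alt host version hole_num sketch_id sketch option_idx option
instance (host : String) (version : String) (hole_num : Int) (sketch_id : String) (sketch : String) (option_idx : Int) (option : String) (out : String) : Decidable (Spec_createSketchWithFilledHole host version hole_num sketch_id sketch option_idx option out) := by unfold Spec_createSketchWithFilledHole; infer_instance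

-- ===== CLAIM (what is proved, stated in full; the proofs are below) =====
def Claim_equal_createSketchWithFilledHole : Prop := ∀ (host : String) (version : String) (hole_num : Int) (sketch_id : String) (sketch : String) (option_idx : Int) (option : String), Dom_createSketchWithFilledHole host version hole_num sketch_id sketch option_idx option → Spec_createSketchWithFilledHole host version hole_num sketch_id sketch option_idx option (createSketchWithFilledHole host version hole_num sketch_id sketch option_idx option)

-- ===== LEMMAS AND PROOFS =====

-- The accumulator of A's loop only collects output: it can be factored out.
theorem cswfhLoop_acc (h : Int) (opt : List Char) (cs : List Char) :
    ∀ (k : Int) (acc : List Char), cswfhLoop h opt cs k acc = acc ++ cswfhLoop h opt cs k [] := by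
  induction cs with
  | nil => intro k acc; simp [cswfhLoop]
  | cons c cs ih =>
    intro k acc
    simp only [cswfhLoop]
    split_ifs with hc hk
    · rw [ih _ (acc ++ opt), ih _ ([] ++ opt)]; simp
    · rw [ih _ (acc ++ [c]), ih _ ([] ++ [c])]; simp
    · rw [ih _ (acc ++ [c]), ih _ ([] ++ [c])]; simp

theorem splitOn_q_cons (c : Char) (cs : List Char) :
    List.splitOn '?' (c :: cs) =
      if c = '?' then [] :: List.splitOn '?' cs
      else List.modifyHead (List.cons c) (List.splitOn '?' cs) := by
  simp [List.splitOn, List.splitOnP_cons]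

theorem intercalate_q_single (s : List Char) : ['?'].intercalate [s] = s := by
  simp [List.intercalate]

theorem intercalate_q_cons (s t : List Char) (l : List (List Char)) :
    ['?'].intercalate (s :: t :: l) = s ++ '?' :: ['?'].intercalate (t :: l) := by
  induction l generalizing s t <;> simp_all [List.intercalate]

theorem intercalate_q_head (c : Char) (s : List Char) (l : List (List Char)) :
    ['?'].intercalate ((c :: s) :: l) = c :: ['?'].intercalate (s :: l) := by
  cases l <;> simp [List.intercalate]

theorem splitOn_q_ne_nil (cs : List Char) : List.splitOn '?' cs ≠ [] := by
  simp only [List.splitOn]; exact List.splitOnP_ne_nil _ cs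

theorem splitOn_q_exists_cons (cs : List Char) :
    ∃ s0 rest, List.splitOn '?' cs = s0 :: rest := by
  cases hseg : List.splitOn '?' cs with
  | nil => exact absurd hseg (splitOn_q_ne_nil cs)
  | cons a b => exact ⟨a, b, rfl⟩

-- Main invariant: scanning cs with the counter starting at k produces the split/rejoin value.
theorem cswfhLoop_eq_split (h : Int) (opt : List Char) (cs : List Char) :
    ∀ (k : Int),
      cswfhLoop h opt cs k [] =
        (if k ≤ h ∧ h < k + ((List.splitOn '?' cs).length : Int) - 1 then
          ['?'].intercalate ((List.splitOn '?' cs).take ((h - k).toNat + 1)) ++ opt ++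
            ['?'].intercalate ((List.splitOn '?' cs).drop ((h - k).toNat + 1))
        else cs) := by
  induction cs with
  | nil =>
    intro k
    rw [if_neg]
    · simp [cswfhLoop]
    · simp only [List.splitOn, List.splitOnP_nil, List.length_cons, List.length_nil]
      push_cast; omega
  | cons c cs ih =>
    intro k
    have ⟨s0, rest, hsegs⟩ := splitOn_q_exists_cons cs
    have hlen : 1 ≤ (List.splitOn '?' cs).length := by rw [hsegs]; simp
    by_cases hc : c = '?'
    · subst hc
      rw [splitOn_q_cons, if_pos rfl]
      by_cases hk : k = h
      · subst hk
        rw [if_pos ⟨le_refl k, by simp only [List.length_cons]; push_cast; omega⟩]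
        conv_lhs => rw [cswfhLoop]
        rw [if_pos rfl, if_pos rfl, cswfhLoop_acc, ih (k + 1), if_neg (by omega)]
        have h0 : (k - k).toNat = 0 := by omega
        rw [h0]
        simp only [List.take_succ_cons, List.take_zero, List.drop_succ_cons, List.drop_zero]
        rw [intercalate_q_single, List.intercalate_splitOn cs '?']
      · conv_lhs => rw [cswfhLoop]
        rw [if_pos rfl, if_neg hk, cswfhLoop_acc, ih (k + 1)]
        by_cases hin : k + 1 ≤ h ∧ h < (k + 1) + ((List.splitOn '?' cs).length : Int) - 1
        · rw [if_pos hin,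
            if_pos (show k ≤ h ∧ h < k + ((([] :: List.splitOn '?' cs).length : Int)) - 1 by
              simp only [List.length_cons]; push_cast; omega)]
          have htn : (h - k).toNat = (h - (k + 1)).toNat + 1 := by omega
          rw [htn, hsegs]
          simp only [List.take_succ_cons, List.drop_succ_cons]
          rw [intercalate_q_cons]
          simp
        · rw [if_neg hin,
            if_neg (show ¬(k ≤ h ∧ h < k + ((([] :: List.splitOn '?' cs).length : Int)) - 1) by
              simp only [List.length_cons]; push_cast at hin ⊢; omega)]
          simp
    · rw [splitOn_q_cons, if_neg hc]
      conv_lhs => rw [cswfhLoop]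
      rw [if_neg hc, cswfhLoop_acc, ih k, hsegs]
      simp only [List.modifyHead, List.length_cons]
      split_ifs with hin
      · simp only [List.take_succ_cons, List.drop_succ_cons]
        rw [intercalate_q_head]
        simp
      · simp

-- ===== VERDICT (by name: the statement is the Claim_ definition above) =====
theorem createSketchWithFilledHole_spec : Claim_equal_createSketchWithFilledHole := by
  intro host version hole_num sketch_id sketch option_idx option _
  unfold Spec_createSketchWithFilledHole createSketchWithFilledHole createSketchWithFilledHole_alt
  rw [cswfhLoop_eq_split]
  by_cases hin : 0 ≤ hole_num ∧ hole_num < ((List.splitOn '?' sketch.toList).length : Int) - 1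
  · rw [if_pos (by omega), if_pos hin]
    have h0 : (hole_num - 0).toNat = hole_num.toNat := by omega
    rw [h0]
  · rw [if_neg (by omega), if_neg hin]
    exact String.ofList_toList
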